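-- pv_equiv track=rewrite | github.com/ParthLad03/AIWebScraper | backend/link_extractor.py | get_crawlable_links
-- ===== SOURCE A (Python) =====
-- from typing import Dict, List, Set
--
-- def get_crawlable_links(links: Dict, max_links: int = 20) -> List[str]:
--     """Get prioritized list of links suitable for crawling"""
--     crawlable = []
--
--     # Add navigation links (highest priority)
--     nav_links = links.get('navigation', [])
--     crawlable.extend([link['url'] for link in nav_links[:10]])
--
--     # Add important links
--     important_links = links.get('important', [])
--     crawlable.extend([link['url'] for link in important_links[:5]])
--
--     # Add content links
--     content_links = links.get('content', [])
--     crawlable.extend([link['url'] for link in content_links[:5]])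
--
--     # Remove duplicates while preserving order
--     seen = set()
--     unique_crawlable = []
--     for url in crawlable:
--         if url not in seen:
--             seen.add(url)
--             unique_crawlable.append(url)
--
--     return unique_crawlable[:max_links]
-- ===== SOURCE B (Python) =====
-- def get_crawlable_links(links, max_links=20):
--     """Get prioritized list of links suitable for crawling"""
--     candidates = [link['url']
--                   for cat, lim in (('navigation', 10), ('important', 5), ('content', 5))
--                   for link in links.get(cat, [])[:lim]]
--
--     def dedup(rest, acc):
--         if not rest:
--             return acc
--         head, tail = rest[0], rest[1:]
--         return dedup(tail, acc if head in acc else acc + [head])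
--
--     return dedup(candidates, [])[:max_links]
-- ===== Notes on version B (the rewrite author's own statement) =====
-- stated objective: alternative
-- what changed: Replaces A's three imperative extend blocks plus a set-and-mutation dedup loop by a single comprehension over a (category, limit) table producing the candidate urls, followed by a purely functional recursive dedup that tests membership directly in the accumulated output list (no auxiliary set, no mutation).
import Mathlib
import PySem

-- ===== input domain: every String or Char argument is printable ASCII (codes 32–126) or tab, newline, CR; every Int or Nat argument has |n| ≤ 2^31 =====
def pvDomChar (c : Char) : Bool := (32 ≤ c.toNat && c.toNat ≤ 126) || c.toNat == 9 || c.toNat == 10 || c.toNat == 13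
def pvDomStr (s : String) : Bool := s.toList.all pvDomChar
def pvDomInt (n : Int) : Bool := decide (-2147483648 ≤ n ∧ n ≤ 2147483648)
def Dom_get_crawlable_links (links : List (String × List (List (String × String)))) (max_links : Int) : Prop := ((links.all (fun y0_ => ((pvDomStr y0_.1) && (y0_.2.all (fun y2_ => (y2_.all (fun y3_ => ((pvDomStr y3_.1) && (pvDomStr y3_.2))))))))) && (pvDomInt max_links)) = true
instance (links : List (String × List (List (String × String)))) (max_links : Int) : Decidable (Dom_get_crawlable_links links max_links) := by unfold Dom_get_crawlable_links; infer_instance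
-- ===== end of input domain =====

-- B replaces A's three extend blocks plus a set-based dedup loop by one comprehension over a
-- (category, limit) table followed by a purely functional recursive dedup that tests membership
-- in the accumulated output (no auxiliary set) — objective: alternative decomposition, same cost class.
-- link['url'] is ported as getD "url" "": exact under Pre_ (the key is present there; Python raises KeyError otherwise).

-- ===== PORT A =====
def get_crawlable_links (links : List (String × List (List (String × String)))) (max_links : Int) : List String :=
  -- nav_links = links.get('navigation', []); crawlable.extend([link['url'] for link in nav_links[:10]]) … etc.
  let d := PySem.Dict.mk links
  let nav_links := d.getD "navigation" []
  let important_links := d.getD "important" []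
  let content_links := d.getD "content" []
  let crawlable : List String :=
    (PySem.List.slice nav_links none (some 10)).map (fun link => (PySem.Dict.mk link).getD "url" "")
    ++ (PySem.List.slice important_links none (some 5)).map (fun link => (PySem.Dict.mk link).getD "url" "")
    ++ (PySem.List.slice content_links none (some 5)).map (fun link => (PySem.Dict.mk link).getD "url" "")
  -- seen = set(); unique_crawlable = []; for url in crawlable: if url not in seen: …
  let st := crawlable.foldl
    (fun (st : PySem.Set String × List String) url =>
      if ¬ PySem.Set.contains st.1 url then (PySem.Set.add st.1 url, st.2 ++ [url]) else st)
    (PySem.Set.empty, [])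
  PySem.List.slice st.2 none (some max_links)

-- ===== PORT B =====
-- def dedup(rest, acc): recursion on rest, membership tested in acc itself
def pvDedup : List String → List String → List String
  | [], acc => acc
  | head :: tail, acc => pvDedup tail (if head ∈ acc then acc else acc ++ [head])

def get_crawlable_links_alt (links : List (String × List (List (String × String)))) (max_links : Int) : List String :=
  let d := PySem.Dict.mk links
  -- candidates = [link['url'] for cat, lim in table for link in links.get(cat, [])[:lim]]
  let candidates : List String :=
    ([("navigation", (10 : Int)), ("important", 5), ("content", 5)]).flatMap
      (fun cl => (PySem.List.slice (d.getD cl.1 []) none (some cl.2)).map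
        (fun link => (PySem.Dict.mk link).getD "url" ""))
  PySem.List.slice (pvDedup candidates []) none (some max_links)

-- ===== PRECONDITION & SPEC =====
-- Pre_ excludes exactly the inputs where Python A raises KeyError: a link dict without key 'url'
-- among the sliced navigation[:10] / important[:5] / content[:5] entries (B raises there too).
def Pre_get_crawlable_links (links : List (String × List (List (String × String)))) (max_links : Int) : Prop :=
  ((((PySem.Dict.mk links).getD "navigation" []).take 10
    ++ (((PySem.Dict.mk links).getD "important" []).take 5)
    ++ (((PySem.Dict.mk links).getD "content" []).take 5)).all
      (fun link => (PySem.Dict.mk link).contains "url")) = true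
instance (links : List (String × List (List (String × String)))) (max_links : Int) : Decidable (Pre_get_crawlable_links links max_links) := by unfold Pre_get_crawlable_links; infer_instance
def pvWitness_get_crawlable_links : (List (String × List (List (String × String)))) × Int :=
  ([("navigation", [[("url", "https://a.example")]]), ("content", [[("url", "https://b.example")]])], 20)

def Spec_get_crawlable_links (links : List (String × List (List (String × String)))) (max_links : Int) (out : List String) : Prop := out = get_crawlable_links_alt links max_links
instance (links : List (String × List (List (String × String)))) (max_links : Int) (out : List String) : Decidable (Spec_get_crawlable_links links max_links out) := by unfold Spec_get_crawlable_links; infer_instance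

-- ===== CLAIM (what is proved, stated in full; the proofs are below) =====
def Claim_equal_get_crawlable_links : Prop := ∀ (links : List (String × List (List (String × String)))) (max_links : Int), Dom_get_crawlable_links links max_links → Pre_get_crawlable_links links max_links → Spec_get_crawlable_links links max_links (get_crawlable_links links max_links)

-- ===== LEMMAS AND PROOFS =====

-- A's set-driven fold produces the same output list as B's acc-membership recursion,
-- under the invariant that the set contains exactly the accumulated urls.
theorem pv_fold_eq_dedup : ∀ (xs : List String) (s : PySem.Set String) (acc : List String),
    (∀ x, PySem.Set.contains s x = true ↔ x ∈ acc) →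
    (xs.foldl
      (fun (st : PySem.Set String × List String) url =>
        if ¬ PySem.Set.contains st.1 url then (PySem.Set.add st.1 url, st.2 ++ [url]) else st)
      (s, acc)).2 = pvDedup xs acc := by
  intro xs
  induction xs with
  | nil => intro s acc _; simp [pvDedup]
  | cons h t ih =>
    intro s acc hinv
    simp only [List.foldl_cons, pvDedup]
    by_cases hm : h ∈ acc
    · rw [if_neg (not_not_intro ((hinv h).mpr hm)), if_pos hm]
      exact ih s acc hinv
    · rw [if_pos (fun hc => hm ((hinv h).mp hc)), if_neg hm]
      apply ih
      intro x
      rw [PySem.Set.contains_iff, PySem.Set.mem_add, List.mem_append, List.mem_singleton,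
        ← PySem.Set.contains_iff, hinv x]

-- ===== VERDICT (by name: the statement is the Claim_ definition above) =====
theorem get_crawlable_links_spec : Claim_equal_get_crawlable_links := by
  intro links max_links _ _
  unfold Spec_get_crawlable_links get_crawlable_links get_crawlable_links_alt
  simp only [List.flatMap_cons, List.flatMap_nil, List.append_nil, List.append_assoc]
  rw [pv_fold_eq_dedup]
  intro x
  simp [PySem.Set.empty]
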